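-- pv_equiv track=rewrite | github.com/surajit20072003/ai-document-presentation-v3 | core/pipeline_v15_optimized.py | _extract_source_content
-- ===== SOURCE A (Python) =====
-- from typing import Dict, List, Optional, Tuple, Any
--
-- def _extract_source_content(markdown_content: str, source_blocks: List[int]) -> str:
--     """Extract relevant markdown content for a section based on source blocks."""
--     lines = markdown_content.split('\n')
--     if not source_blocks:
--         return markdown_content[:3000]
--
--     block_num = 0
--     extracted = []
--     current_block = []
--
--     for line in lines:
--         stripped = line.strip()
--         if stripped.startswith('#') or (stripped and not current_block):
--             if current_block and block_num in source_blocks: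
--                 extracted.extend(current_block)
--             current_block = [line]
--             block_num += 1
--         else:
--             current_block.append(line)
--
--     if current_block and block_num in source_blocks:
--         extracted.extend(current_block)
--
--     return '\n'.join(extracted) if extracted else markdown_content[:3000]
-- ===== SOURCE B (Python) =====
-- from typing import List
--
--
-- def _extract_source_content(markdown_content: str, source_blocks: List[int]) -> str:
--     """Extract relevant markdown content for a section based on source blocks."""
--     if not source_blocks:
--         return markdown_content[:3000]
--     lines = markdown_content.split('\n')
--     # Pass 1: index table of the line numbers where a new block begins.
--     starts = [i for i, line in enumerate(lines)
--               if line.strip().startswith('#') or (i == 0 and line.strip())]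
--     bounds = starts + [len(lines)]
--     wanted = set(source_blocks)
--     # Pass 2: slice each wanted block out of `lines`; block 0 is lines[:bounds[0]]
--     # (empty when line 0 itself starts a block), block k >= 1 is lines[bounds[k-1]:bounds[k]].
--     pieces = ([lines[:bounds[0]]] if 0 in wanted else []) + \
--         [lines[s:e] for k, (s, e) in enumerate(zip(bounds, bounds[1:]), start=1)
--          if k in wanted]
--     extracted = [ln for p in pieces for ln in p]
--     return '\n'.join(extracted) if extracted else markdown_content[:3000]
-- ===== Notes on version B (the rewrite author's own statement) =====
-- stated objective: alternative
-- what changed: B replaces A's single accumulating pass (block counter + current_block buffer flushed into extracted) by an index-then-slice restructuring: pass 1 builds a table of block-start line numbers, pass 2 slices lines[s:e] between consecutive boundaries for the wanted block numbers (block 0 being the prefix before the first boundary) and concatenates the slices.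
import Mathlib
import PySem

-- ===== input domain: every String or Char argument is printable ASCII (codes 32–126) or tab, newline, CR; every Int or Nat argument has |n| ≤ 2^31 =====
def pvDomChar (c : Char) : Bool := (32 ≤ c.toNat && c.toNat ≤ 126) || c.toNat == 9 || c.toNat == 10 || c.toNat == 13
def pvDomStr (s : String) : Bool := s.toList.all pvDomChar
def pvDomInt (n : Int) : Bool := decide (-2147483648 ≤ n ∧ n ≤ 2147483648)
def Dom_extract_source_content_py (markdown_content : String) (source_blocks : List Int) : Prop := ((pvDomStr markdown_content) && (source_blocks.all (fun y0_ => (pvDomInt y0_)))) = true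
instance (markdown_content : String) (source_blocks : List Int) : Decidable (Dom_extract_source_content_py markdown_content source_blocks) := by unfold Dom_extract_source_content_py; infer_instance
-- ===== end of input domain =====

-- B replaces A's single accumulating pass (block counter + current_block buffer) by an
-- index-then-slice restructuring: pass 1 records the block-start line numbers, pass 2 slices
-- lines[s:e] between consecutive boundaries for the wanted block numbers (objective: alternative).

-- ===== PORT A =====
-- markdown_content.split('\n')  (exact: Chars.splitOn with sep ≠ "", lifted to String)
def pvLines (markdown_content : String) : List String :=
  (PySem.Chars.splitOn markdown_content.toList ['\n']).map String.ofList

-- one loop iteration of A: state = (block_num, extracted, current_block)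
def pvStepA (sb : List Int) (st : Int × List String × List String) (line : String) : Int × List String × List String :=
  let stripped := PySem.Str.strip line
  let bn := st.1; let ext := st.2.1; let cur := st.2.2
  if PySem.Str.startswith stripped "#" || ((stripped != "") && cur.isEmpty) then
    let ext' := if !cur.isEmpty && sb.contains bn then ext ++ cur else ext
    (bn + 1, ext', [line])
  else
    (bn, ext, cur ++ [line])

def extract_source_content_py (markdown_content : String) (source_blocks : List Int) : String :=
  let lines := pvLines markdown_content
  if source_blocks.isEmpty then PySem.Str.slice markdown_content none (some 3000)
  else
    let st := lines.foldl (pvStepA source_blocks) (0, [], [])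
    let ext := if !st.2.2.isEmpty && source_blocks.contains st.1 then st.2.1 ++ st.2.2 else st.2.1
    if !ext.isEmpty then PySem.Str.join "\n" ext else PySem.Str.slice markdown_content none (some 3000)

-- ===== PORT B =====
-- line.strip().startswith('#')
def pvP (l : String) : Bool := PySem.Str.startswith (PySem.Str.strip l) "#"

-- the comprehension's condition: line.strip().startswith('#') or (i == 0 and line.strip())
def pvStart0 (i : Int) (line : String) : Bool :=
  pvP line || (i == 0 && (PySem.Str.strip line != ""))

def extract_source_content_py_alt (markdown_content : String) (source_blocks : List Int) : String :=
  if source_blocks.isEmpty then PySem.Str.slice markdown_content none (some 3000)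
  else
    let lines := pvLines markdown_content
    -- starts = [i for i, line in enumerate(lines) if ...]
    let starts := ((PySem.List.enumerate lines 0).filter (fun p => pvStart0 p.1 p.2)).map (·.1)
    let bounds := starts ++ [(lines.length : Int)]
    let wanted := PySem.Set.ofList source_blocks
    -- pieces: block 0 slice (lines[:bounds[0]]) if wanted, then one slice per boundary pair
    let pieces : List (List String) :=
      (if PySem.Set.contains wanted 0 then
        [PySem.List.slice lines none (some (PySem.List.pyGetD bounds 0 0))] else []) ++
      ((PySem.List.enumerate (bounds.zip (PySem.List.slice bounds (some 1) none)) 1).filter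
          (fun p => PySem.Set.contains wanted p.1)).map
        (fun p => PySem.List.slice lines (some p.2.1) (some p.2.2))
    let extracted := pieces.flatMap id
    if !extracted.isEmpty then PySem.Str.join "\n" extracted
    else PySem.Str.slice markdown_content none (some 3000)

-- ===== PRECONDITION & SPEC =====
def Spec_extract_source_content_py (markdown_content : String) (source_blocks : List Int) (out : String) : Prop := out = extract_source_content_py_alt markdown_content source_blocks
instance (markdown_content : String) (source_blocks : List Int) (out : String) : Decidable (Spec_extract_source_content_py markdown_content source_blocks out) := by unfold Spec_extract_source_content_py; infer_instance

-- ===== CLAIM (what is proved, stated in full; the proofs are below) =====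
def Claim_equal_extract_source_content_py : Prop := ∀ (markdown_content : String) (source_blocks : List Int), Dom_extract_source_content_py markdown_content source_blocks → Spec_extract_source_content_py markdown_content source_blocks (extract_source_content_py markdown_content source_blocks)

-- ===== LEMMAS AND PROOFS =====

lemma pv_contains_ofList (sb : List Int) (x : Int) :
    PySem.Set.contains (PySem.Set.ofList sb) x = sb.contains x := by
  rw [Bool.eq_iff_iff]
  simp [PySem.Set.mem_ofList]

-- A's flush of the current block after the loop
def pvFlush (sb : List Int) (st : Int × List String × List String) : List String :=
  if !st.2.2.isEmpty && sb.contains st.1 then st.2.1 ++ st.2.2 else st.2.1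

-- A's loop followed by the flush, written recursively (cur is never empty)
def pvAF (sb : List Int) (bn : Int) (cur : List String) : List String → List String
  | [] => if sb.contains bn then cur else []
  | l :: t => if pvP l then (if sb.contains bn then cur else []) ++ pvAF sb (bn + 1) [l] t
              else pvAF sb bn (cur ++ [l]) t

-- reference: each line kept iff its block label is wanted
def pvW (sb : List Int) (bn : Int) : List String → List String
  | [] => []
  | l :: t => if pvP l then (if sb.contains (bn + 1) then [l] else []) ++ pvW sb (bn + 1) t
              else (if sb.contains bn then [l] else []) ++ pvW sb bn t

-- absolute positions (offset o) of '#'-start lines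
def pvIdx (o : Nat) : List String → List Int
  | [] => []
  | l :: t => (if pvP l then [(o : Int)] else []) ++ pvIdx (o + 1) t

-- B's pass 2 over a start list: slice from each start to the next (or to N)
def pvPS (sb : List Int) (L : List String) (N : Int) (k : Int) : List Int → List String
  | [] => []
  | s :: ss => (if sb.contains k then PySem.List.slice L (some s) (some (ss.headD N)) else [])
      ++ pvPS sb L N (k + 1) ss

lemma pvA_fold (sb : List Int) : ∀ (t : List String) (bn : Int) (ext cur : List String), cur ≠ [] →
    pvFlush sb (t.foldl (pvStepA sb) (bn, ext, cur)) = ext ++ pvAF sb bn cur t := by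
  intro t
  induction t with
  | nil =>
    intro bn ext cur hcur
    have hc : cur.isEmpty = false := by simpa [List.isEmpty_iff] using hcur
    simp only [List.foldl_nil, pvFlush, pvAF, hc, Bool.not_false, Bool.true_and]
    by_cases hm : bn ∈ sb <;> simp [hm]
  | cons l t ih =>
    intro bn ext cur hcur
    have hc : cur.isEmpty = false := by simpa [List.isEmpty_iff] using hcur
    simp only [List.foldl_cons]
    by_cases h : pvP l = true
    · have hA : pvStepA sb (bn, ext, cur) l =
          (bn + 1, (if sb.contains bn then ext ++ cur else ext), [l]) := by
        simp [pvStepA, pvP] at h ⊢; simp [h, hcur]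
      rw [hA, ih (bn + 1) _ [l] (by simp)]
      simp only [pvAF, h, if_true]
      by_cases hm : bn ∈ sb <;> simp [hm]
    · have hA : pvStepA sb (bn, ext, cur) l = (bn, ext, cur ++ [l]) := by
        simp [pvStepA, pvP] at h ⊢; simp [h, hcur]
      rw [hA, ih bn ext (cur ++ [l]) (by simp)]
      simp only [pvAF, h]
      simp

lemma pvAF_eq (sb : List Int) : ∀ (t : List String) (bn : Int) (cur : List String),
    pvAF sb bn cur t = (if sb.contains bn then cur else []) ++ pvW sb bn t := by
  intro t
  induction t with
  | nil => intro bn cur; simp [pvAF, pvW]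
  | cons l t ih =>
    intro bn cur
    by_cases h : pvP l = true
    · simp only [pvAF, pvW, h, if_true, ih (bn + 1) [l]]
    · simp only [pvAF, pvW, h, if_false, Bool.false_eq_true, ih bn (cur ++ [l])]
      by_cases hm : bn ∈ sb <;> simp [hm]

lemma pv_starts_eq : ∀ (t : List String) (s : Nat), 1 ≤ s →
    (((PySem.List.enumerate t (s : Int)).filter (fun p => pvStart0 p.1 p.2)).map (·.1)) = pvIdx s t := by
  intro t
  induction t with
  | nil => intro s _; simp [PySem.List.enumerate_nil, pvIdx]
  | cons l t ih =>
    intro s hs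
    have hz : (((s : Nat) : Int) == 0) = false := by
      simp only [beq_eq_false_iff_ne, ne_eq, Int.natCast_eq_zero]; omega
    have hstep : ((s : Int) + 1) = (((s + 1 : Nat)) : Int) := by push_cast; ring
    have hcond : pvStart0 ((s : Nat) : Int) l = pvP l := by
      simp [pvStart0, hz]
    rw [PySem.List.enumerate_cons, List.filter_cons]
    simp only [hcond, hstep, pvIdx]
    by_cases h : pvP l = true
    · simp only [h, if_true, List.map_cons, ih (s + 1) (by omega)]
      simp
    · simp only [h, Bool.false_eq_true, if_false, ih (s + 1) (by omega)]
      simp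

lemma pv_zip_eq (sb : List Int) (L : List String) (N : Int) : ∀ (ss : List Int) (k : Int),
    (((PySem.List.enumerate ((ss ++ [N]).zip (ss ++ [N]).tail) k).filter (fun p => sb.contains p.1)).map
        (fun p => PySem.List.slice L (some p.2.1) (some p.2.2))).flatten = pvPS sb L N k ss := by
  intro ss
  induction ss with
  | nil => intro k; simp [PySem.List.enumerate_nil, pvPS]
  | cons s ss ih =>
    intro k
    cases ss with
    | nil =>
      simp only [List.cons_append, List.nil_append, List.tail_cons, List.zip_cons_cons,
        List.zip_nil_right, PySem.List.enumerate_cons, PySem.List.enumerate_nil, pvPS,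
        List.filter_cons, List.filter_nil, List.headD_nil]
      by_cases hm : k ∈ sb <;> simp [hm]
    | cons s' ss' =>
      have ht := ih (k + 1)
      simp only [List.cons_append, List.tail_cons, List.contains_eq_mem] at ht ⊢
      rw [pvPS]
      simp only [List.zip_cons_cons, PySem.List.enumerate_cons, List.filter_cons,
        List.headD_cons]
      by_cases hm : k ∈ sb
      · simp only [List.contains_eq_mem]
        simp only [hm, decide_true, if_true, List.map_cons, List.flatten_cons, ht]
      · simp only [List.contains_eq_mem]
        simp only [hm, decide_false, Bool.false_eq_true, if_false, ht, List.nil_append]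

lemma pv_main2 (sb : List Int) : ∀ (tt : List String) (o : Nat) (bn : Int) (acc L : List String),
    L.drop o = acc ++ tt →
    pvPS sb L (L.length : Int) (bn + 1) ((o : Int) :: pvIdx (o + acc.length) tt)
      = (if sb.contains (bn + 1) then acc else []) ++ pvW sb (bn + 1) tt := by
  intro tt
  induction tt with
  | nil =>
    intro o bn acc L hL
    have hsl : PySem.List.slice L (some (o : Int)) (some (L.length : Int)) = acc := by
      rw [show ((L.length : Int)) = ((L.length : Nat) : Int) from rfl, PySem.List.slice_natCast]
      rw [List.take_of_length_le (by simp), hL]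
      simp
    simp only [pvIdx, pvPS, List.headD_nil, hsl, pvW]
  | cons l tt ih =>
    intro o bn acc L hL
    by_cases h : pvP l = true
    · have hcast : ((o + acc.length : Nat) : Int) = (((o + acc.length : Nat)) : Int) := rfl
      have hsl : PySem.List.slice L (some (o : Int)) (some ((o + acc.length : Nat) : Int)) = acc := by
        rw [PySem.List.slice_natCast, hL]
        simp [List.take_left']
      have hdrop : L.drop (o + acc.length) = [l] ++ tt := by
        rw [← List.drop_drop, hL]
        simp [List.drop_left']
      have hrec := ih (o + acc.length) (bn + 1) [l] L (by simpa using hdrop)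
      simp only [List.length_cons, List.length_nil, Nat.zero_add] at hrec
      simp only [pvIdx, h, if_true, List.cons_append, List.nil_append, pvPS, List.headD_cons,
        hsl, pvW, hrec]
    · have hL' : L.drop o = (acc ++ [l]) ++ tt := by simpa using hL
      have hrec := ih o bn (acc ++ [l]) L hL'
      simp only [List.length_append, List.length_cons, List.length_nil] at hrec
      have hoff : o + acc.length + 1 = o + (acc.length + (0 + 1)) := by omega
      simp only [pvIdx, h, Bool.false_eq_true, if_false, List.nil_append, pvW]
      rw [show o + acc.length + 1 = o + (acc.length + (0 + 1)) from by omega] at *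
      rw [show (o + (acc.length + (0 + 1))) = o + (acc ++ [l]).length from by simp] at *
      rw [hrec]
      by_cases hm : bn + 1 ∈ sb <;> simp [hm]

lemma pv_main0 (sb : List Int) : ∀ (tt acc : List String) (bn : Int) (L : List String),
    L = acc ++ tt →
    (if sb.contains bn then
        PySem.List.slice L none (some ((pvIdx acc.length tt ++ [(L.length : Int)]).headD 0)) else [])
      ++ pvPS sb L (L.length : Int) (bn + 1) (pvIdx acc.length tt)
    = (if sb.contains bn then acc else []) ++ pvW sb bn tt := by
  intro tt
  induction tt with
  | nil =>
    intro acc bn L hL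
    have hsl : PySem.List.slice L none (some (L.length : Int)) = acc := by
      rw [show ((L.length : Int)) = ((L.length : Nat) : Int) from rfl, PySem.List.slice_to_natCast]
      simp [hL]
    simp only [pvIdx, List.nil_append, List.headD_cons, hsl, pvPS, pvW, List.append_nil]
  | cons l tt ih =>
    intro acc bn L hL
    by_cases h : pvP l = true
    · have hsl : PySem.List.slice L none (some ((acc.length : Nat) : Int)) = acc := by
        rw [PySem.List.slice_to_natCast, hL]
        exact List.take_left
      have hdrop : L.drop acc.length = [l] ++ tt := by
        rw [hL]; simp [List.drop_left']
      have hrec := pv_main2 sb tt acc.length bn [l] L (by simpa using hdrop)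
      simp only [List.length_cons, List.length_nil, Nat.zero_add] at hrec
      simp only [pvIdx, h, if_true, List.cons_append, List.nil_append, List.headD_cons, hsl,
        pvW, hrec]
    · have hrec := ih (acc ++ [l]) bn L (by simpa using hL)
      simp only [List.length_append, List.length_cons, List.length_nil] at hrec
      simp only [pvIdx, h, Bool.false_eq_true, if_false, List.nil_append, pvW]
      rw [show acc.length + 1 = acc.length + (0 + 1) from by omega] at *
      rw [hrec]
      by_cases hm : bn ∈ sb <;> simp [hm]

lemma pv_flatten_if (c : Bool) (x : List String) :
    (if c = true then [x] else []).flatten = (if c = true then x else []) := by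
  cases c <;> simp

lemma pv_pyGetD_zero (xs : List Int) (d : Int) (h : xs ≠ []) :
    PySem.List.pyGetD xs 0 d = xs.headD d := by
  cases xs with
  | nil => exact absurd rfl h
  | cons x xs => simp [PySem.List.pyGetD, PySem.List.pyGet?, PySem.List.pyIdx?]

-- ===== VERDICT (by name: the statement is the Claim_ definition above) =====
set_option maxHeartbeats 1000000 in
theorem extract_source_content_py_spec : Claim_equal_extract_source_content_py := by
  intro mc sb _
  unfold Spec_extract_source_content_py extract_source_content_py extract_source_content_py_alt
  by_cases hsb : sb.isEmpty
  · simp [hsb]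
  · simp only [hsb, if_false, Bool.false_eq_true, pv_contains_ofList, PySem.List.slice_from_one,
      List.flatMap_append, List.flatMap_id]
    cases hls : pvLines mc with
    | nil =>
      simp [PySem.List.enumerate_nil, PySem.List.pyGetD, PySem.List.pyGet?,
        PySem.List.pyIdx?, PySem.List.slice]
    | cons l0 rest =>
      have hst : ((PySem.List.enumerate rest 1).filter (fun p => pvStart0 p.1 p.2)).map (·.1)
          = pvIdx 1 rest := by
        simpa using pv_starts_eq rest 1 (by omega)
      have hflush : ∀ st : Int × List String × List String,
          (if (!st.2.2.isEmpty && sb.contains st.1) = true then st.2.1 ++ st.2.2 else st.2.1)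
            = pvFlush sb st := fun _ => rfl
      simp only [List.foldl_cons, PySem.List.enumerate_cons, List.filter_cons, zero_add, hflush]
      by_cases h0 : pvStart0 0 l0 = true
      · have hor := h0
        simp only [pvStart0, pvP, beq_self_eq_true, Bool.true_and] at hor
        have hA0 : pvStepA sb (0, [], []) l0 = ((1 : Int), ([] : List String), [l0]) := by
          simp only [pvStepA, List.isEmpty_nil, Bool.and_true]
          rw [hor]
          simp
        have hz := pv_zip_eq sb (l0 :: rest) (((l0 :: rest).length : Int)) (0 :: pvIdx 1 rest) 1
        have hm2 : pvPS sb (l0 :: rest) (((l0 :: rest).length : Int)) 1 ((0 : Int) :: pvIdx 1 rest)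
            = (if sb.contains 1 = true then [l0] else []) ++ pvW sb 1 rest := by
          simpa using pv_main2 sb rest 0 0 [l0] (l0 :: rest) (by simp)
        rw [hA0, pvA_fold sb rest 1 [] [l0] (by simp), pvAF_eq]
        simp only [h0, if_true, List.map_cons, List.cons_append, hst] at hz ⊢
        rw [hz, hm2]
        rw [pv_pyGetD_zero _ _ (by simp)]
        by_cases hw : (0 : Int) ∈ sb <;> simp [hw, PySem.List.slice_to]
      · have h0' : pvStart0 0 l0 = false := by simpa using h0
        have hor := h0'
        simp only [pvStart0, pvP, beq_self_eq_true, Bool.true_and] at hor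
        have hA0 : pvStepA sb (0, [], []) l0 = ((0 : Int), ([] : List String), [l0]) := by
          simp only [pvStepA, List.isEmpty_nil, Bool.and_true]
          rw [hor]
          simp
        have hz := pv_zip_eq sb (l0 :: rest) (((l0 :: rest).length : Int)) (pvIdx 1 rest) 1
        have hm0 : (if sb.contains 0 = true then
              PySem.List.slice (l0 :: rest) none
                (some ((pvIdx 1 rest ++ [((l0 :: rest).length : Int)]).headD 0)) else [])
            ++ pvPS sb (l0 :: rest) (((l0 :: rest).length : Int)) 1 (pvIdx 1 rest)
            = (if sb.contains 0 = true then [l0] else []) ++ pvW sb 0 rest := by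
          simpa using pv_main0 sb rest [l0] 0 (l0 :: rest) rfl
        rw [hA0, pvA_fold sb rest 0 [] [l0] (by simp), pvAF_eq]
        simp only [h0', Bool.false_eq_true, if_false, hst] at hz ⊢
        rw [hz]
        rw [pv_pyGetD_zero _ _ (by simp)]
        simp only [pv_flatten_if]
        rw [hm0]
        simp
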